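-- pv_equiv track=rewrite | github.com/Zahira-raoui/Python | BioInformatique.py | matrice
-- ===== SOURCE A (Python) =====
-- def matrice(P, Q):
--     len_P, len_Q = len(P), len(Q)
--     M = [[0] * len_Q for _ in range(len_P)]
--     for i in range(len_P):
--         for j in range(len_Q):
--             if P[i] == Q[j]:
--                 if i == 0 or j == 0:
--                     M[i][j] = 1
--                 else:
--                     M[i][j] = M[i - 1][j - 1] + 1
--     return M
-- ===== SOURCE B (Python) =====
-- def matrice(P, Q):
--     len_P, len_Q = len(P), len(Q)
--     diags = []
--     for d in range(-(len_Q - 1), len_P):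
--         if d >= 0:
--             i, j = d, 0
--         else:
--             i, j = 0, -d
--         vals = []
--         c = 0
--         while i < len_P and j < len_Q:
--             c = c + 1 if P[i] == Q[j] else 0
--             vals.append(c)
--             i += 1
--             j += 1
--         diags.append(vals)
--     return [[diags[i - j + len_Q - 1][min(i, j)] for j in range(len_Q)]
--             for i in range(len_P)]
-- ===== Notes on version B (the rewrite author's own statement) =====
-- stated objective: alternative
-- what changed: B replaces A's row-major DP pass that reads M[i-1][j-1] by an anti-diagonal sweep: each diagonal is scanned once with a running counter (reset on mismatch), and the matrix is then assembled by indexing the diagonal lists.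
import Mathlib
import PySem

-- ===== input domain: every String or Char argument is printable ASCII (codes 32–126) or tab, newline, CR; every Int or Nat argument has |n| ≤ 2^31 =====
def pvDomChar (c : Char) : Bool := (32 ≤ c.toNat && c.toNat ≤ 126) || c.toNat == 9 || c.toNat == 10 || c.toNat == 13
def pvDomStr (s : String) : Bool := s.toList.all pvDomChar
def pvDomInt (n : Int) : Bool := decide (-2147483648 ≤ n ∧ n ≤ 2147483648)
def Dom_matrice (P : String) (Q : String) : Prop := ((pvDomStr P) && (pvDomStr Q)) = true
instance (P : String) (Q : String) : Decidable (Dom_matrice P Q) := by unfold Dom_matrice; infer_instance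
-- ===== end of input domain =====

-- B replaces A's row-major DP pass (reading M[i-1][j-1]) by an anti-diagonal sweep
-- with a running counter, then assembles the matrix from the diagonal lists;
-- alternative decomposition of the same O(n*m) work, not claimed faster.

-- ===== PORT A =====
-- loop body of A's inner `for j` loop: if P[i] == Q[j], write the DP value into M[i][j]
def pvStep (p q : List Char) (i : Nat) (M : List (List Int)) (j : Nat) : List (List Int) :=
  if p.getD i ' ' = q.getD j ' ' then
    M.set i ((M.getD i []).set j
      (if i = 0 ∨ j = 0 then (1 : Int) else (M.getD (i - 1) []).getD (j - 1) 0 + 1))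
  else M

def matrice (P : String) (Q : String) : List (List Int) :=
  (List.range P.toList.length).foldl
    (fun M i => (List.range Q.toList.length).foldl (pvStep P.toList Q.toList i) M)
    (List.replicate P.toList.length (List.replicate Q.toList.length 0))

-- ===== PORT B =====
-- B's inner while loop: walk one diagonal from (i0, j0) down-right, keeping the
-- running counter c (incremented on match, reset to 0 on mismatch), collecting values
def diagList (p q : List Char) (i0 j0 : Nat) (c : Int) : List Int :=
  if h : i0 < p.length ∧ j0 < q.length then
    let c' : Int := if p.getD i0 ' ' = q.getD j0 ' ' then c + 1 else 0
    c' :: diagList p q (i0 + 1) (j0 + 1) c'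
  else []
termination_by p.length - i0
decreasing_by omega

-- the loop over d ∈ range(-(len_Q-1), len_P) is ported over the shifted Nat index
-- t = d + len_Q - 1 ∈ range(len_P + len_Q - 1) (same elements, d recovered as an Int);
-- diags[i - j + len_Q - 1] is ported as diags.getD (i + q.length - 1 - j), exact since
-- j < len_Q makes that Nat subtraction equal to the (nonnegative) Python index
def matrice_alt (P : String) (Q : String) : List (List Int) :=
  let p := P.toList
  let q := Q.toList
  let diags := (List.range (p.length + q.length - 1)).map (fun (t : Nat) =>
    let d : Int := (t : Int) - ((q.length : Int) - 1)
    if 0 ≤ d then diagList p q d.toNat 0 0 else diagList p q 0 (-d).toNat 0)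
  (List.range p.length).map (fun i =>
    (List.range q.length).map (fun j =>
      (diags.getD (i + q.length - 1 - j) []).getD (min i j) 0))

-- ===== PRECONDITION & SPEC =====
def Spec_matrice (P : String) (Q : String) (out : List (List Int)) : Prop := out = matrice_alt P Q
instance (P : String) (Q : String) (out : List (List Int)) : Decidable (Spec_matrice P Q out) := by unfold Spec_matrice; infer_instance

-- ===== CLAIM (what is proved, stated in full; the proofs are below) =====
def Claim_equal_matrice : Prop := ∀ (P : String) (Q : String), Dom_matrice P Q → Spec_matrice P Q (matrice P Q)

-- ===== LEMMAS AND PROOFS =====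

-- proof-side characterisation: the diagonal run length ending at cell (i, j)
def pvRun (p q : List Char) : Nat → Nat → Nat
  | 0, j => if p.getD 0 ' ' = q.getD j ' ' then 1 else 0
  | i + 1, 0 => if p.getD (i + 1) ' ' = q.getD 0 ' ' then 1 else 0
  | i + 1, j + 1 => if p.getD (i + 1) ' ' = q.getD (j + 1) ' ' then pvRun p q i j + 1 else 0


theorem pvRun_eq (p q : List Char) (i j : Nat) :
    pvRun p q i j
      = if p.getD i ' ' = q.getD j ' ' then
          (if i = 0 ∨ j = 0 then 1 else pvRun p q (i - 1) (j - 1) + 1)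
        else 0 := by
  rcases i with _ | i <;> rcases j with _ | j <;> simp [pvRun]

theorem map_range_congr {α : Type} (n : Nat) (f g : Nat → α) (h : ∀ j, j < n → f j = g j) :
    (List.range n).map f = (List.range n).map g :=
  List.map_congr_left (fun a ha => h a (List.mem_range.mp ha))

theorem map_range_set {α : Type} (n m : Nat) (f : Nat → α) (v : α) (hm : m < n) :
    ((List.range n).map f).set m v
      = (List.range n).map (fun j => if j = m then v else f j) := by
  apply List.ext_getElem
  · simp
  · intro k h1 h2
    simp only [List.getElem_set, List.getElem_map, List.getElem_range]
    by_cases hk : k = m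
    · subst hk; simp
    · simp [hk, Ne.symm hk]

theorem map_range_getD {α : Type} (n j : Nat) (f : Nat → α) (d : α) (h : j < n) :
    ((List.range n).map f).getD j d = f j := by
  rw [List.getD_eq_getElem _ _ (by simpa using h)]
  simp

theorem inner_fold (p q : List Char) (g : Nat → List Int) (i : Nat) (hi : i < p.length)
    (hrow : g i = (List.range q.length).map (fun _ => (0 : Int)))
    (hprev : 0 < i → g (i - 1) = (List.range q.length).map (fun j => (pvRun p q (i - 1) j : Int))) :
    ∀ m, m ≤ q.length →
      (List.range m).foldl (pvStep p q i) ((List.range p.length).map g)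
        = (List.range p.length).map (fun i' =>
            if i' = i then
              (List.range q.length).map (fun j => if j < m then (pvRun p q i j : Int) else 0)
            else g i') := by
  intro m
  induction m with
  | zero =>
    intro _
    simp only [List.range_zero, List.foldl_nil]
    apply map_range_congr
    intro i' _
    by_cases hii : i' = i
    · rw [if_pos hii, hii, hrow]
      apply map_range_congr
      intro j _
      simp
    · rw [if_neg hii]
  | succ m ih =>
    intro hm
    rw [List.range_succ, List.foldl_append, ih (by omega)]
    simp only [List.foldl_cons, List.foldl_nil]
    unfold pvStep
    by_cases hc : p.getD i ' ' = q.getD m ' '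
    · rw [if_pos hc]
      rw [map_range_getD _ _ _ _ hi, if_pos rfl]
      have hv : (if i = 0 ∨ m = 0 then (1 : Int)
            else (((List.range p.length).map (fun i' =>
              if i' = i then
                (List.range q.length).map (fun j => if j < m then (pvRun p q i j : Int) else 0)
              else g i')).getD (i - 1) []).getD (m - 1) 0 + 1)
          = (pvRun p q i m : Int) := by
        by_cases h0 : i = 0 ∨ m = 0
        · rw [if_pos h0, pvRun_eq, if_pos hc, if_pos h0]
          simp
        · rw [if_neg h0]
          have hne : i - 1 ≠ i := by omega
          rw [map_range_getD _ _ _ _ (by omega : i - 1 < p.length), if_neg hne,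
              hprev (by omega), map_range_getD _ _ _ _ (by omega : m - 1 < q.length),
              pvRun_eq p q i m, if_pos hc, if_neg h0]
          push_cast
          ring
      rw [hv]
      rw [map_range_set _ _ _ _ (by omega : m < q.length),
          map_range_set _ _ _ _ hi]
      apply map_range_congr
      intro i' _
      by_cases hii : i' = i
      · rw [if_pos hii, if_pos hii]
        apply map_range_congr
        intro j hj
        by_cases hjm : j = m
        · rw [if_pos hjm, if_pos (by omega : j < m + 1), hjm]
        · rw [if_neg hjm]
          by_cases hlt : j < m
          · rw [if_pos hlt, if_pos (by omega)]
          · rw [if_neg hlt, if_neg (by omega)]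
      · simp only [if_neg hii]
    · rw [if_neg hc]
      apply map_range_congr
      intro i' _
      by_cases hii : i' = i
      · rw [if_pos hii, if_pos hii]
        apply map_range_congr
        intro j hj
        by_cases hjm : j = m
        · rw [if_neg (by omega : ¬ j < m), if_pos (by omega : j < m + 1),
              show pvRun p q i j = 0 from by rw [pvRun_eq, hjm, if_neg hc]]
          simp
        · by_cases hlt : j < m
          · rw [if_pos hlt, if_pos (by omega)]
          · rw [if_neg hlt, if_neg (by omega)]
      · rw [if_neg hii, if_neg hii]

theorem outer_fold (p q : List Char) :
    ∀ r, r ≤ p.length →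
      (List.range r).foldl (fun M i => (List.range q.length).foldl (pvStep p q i) M)
          (List.replicate p.length (List.replicate q.length 0))
        = (List.range p.length).map (fun i =>
            if i < r then (List.range q.length).map (fun j => (pvRun p q i j : Int))
            else (List.range q.length).map (fun _ => 0)) := by
  intro r
  induction r with
  | zero =>
    intro _
    simp only [List.range_zero, List.foldl_nil, Nat.not_lt_zero, if_false]
    apply List.ext_getElem
    · simp
    · intro k h1 h2
      simp
  | succ r ih =>
    intro hr
    rw [List.range_succ, List.foldl_append, ih (by omega)]
    simp only [List.foldl_cons, List.foldl_nil]
    rw [inner_fold p q _ r (by omega)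
        (by simp)
        (by intro hpos; simp [Nat.sub_lt hpos Nat.one_pos])
        q.length le_rfl]
    apply map_range_congr
    intro i' _
    by_cases hii : i' = r
    · rw [if_pos hii, if_pos (by omega : i' < r + 1)]
      apply map_range_congr
      intro j hj
      rw [if_pos hj, hii]
    · rw [if_neg hii]
      by_cases hlt : i' < r
      · rw [if_pos hlt, if_pos (by omega)]
      · rw [if_neg hlt, if_neg (by omega)]

theorem diag_head (p q : List Char) (i0 j0 : Nat) (c : Int)
    (hc : c = if i0 = 0 ∨ j0 = 0 then 0 else (pvRun p q (i0 - 1) (j0 - 1) : Int)) :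
    (if p.getD i0 ' ' = q.getD j0 ' ' then c + 1 else (0 : Int)) = (pvRun p q i0 j0 : Int) := by
  rw [pvRun_eq]
  by_cases h : p.getD i0 ' ' = q.getD j0 ' '
  · rw [if_pos h, if_pos h]
    by_cases h0 : i0 = 0 ∨ j0 = 0
    · rw [if_pos h0] at hc ⊢
      rw [hc]
      norm_num
    · rw [if_neg h0] at hc ⊢
      rw [hc]
      push_cast
      ring
  · rw [if_neg h, if_neg h]
    norm_num

theorem diag_get (p q : List Char) :
    ∀ (k i0 j0 : Nat) (c : Int),
      c = (if i0 = 0 ∨ j0 = 0 then 0 else (pvRun p q (i0 - 1) (j0 - 1) : Int)) →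
      i0 + k < p.length → j0 + k < q.length →
      (diagList p q i0 j0 c).getD k 0 = (pvRun p q (i0 + k) (j0 + k) : Int) := by
  intro k
  induction k with
  | zero =>
    intro i0 j0 c hc h1 h2
    rw [diagList, dif_pos ⟨by omega, by omega⟩]
    simp only [List.getD_cons_zero, Nat.add_zero]
    exact diag_head p q i0 j0 c hc
  | succ k ih =>
    intro i0 j0 c hc h1 h2
    rw [diagList, dif_pos ⟨by omega, by omega⟩]
    simp only [List.getD_cons_succ]
    have hc' : (if p.getD i0 ' ' = q.getD j0 ' ' then c + 1 else (0 : Int))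
        = (if i0 + 1 = 0 ∨ j0 + 1 = 0 then 0
           else (pvRun p q (i0 + 1 - 1) (j0 + 1 - 1) : Int)) := by
      rw [if_neg (by omega : ¬ (i0 + 1 = 0 ∨ j0 + 1 = 0))]
      simpa using diag_head p q i0 j0 c hc
    have := ih (i0 + 1) (j0 + 1) _ hc' (by omega) (by omega)
    rw [this]
    congr 2 <;> omega

theorem alt_eq (P : String) (Q : String) :
    matrice_alt P Q
      = (List.range P.toList.length).map (fun i =>
          (List.range Q.toList.length).map (fun j =>
            (pvRun P.toList Q.toList i j : Int))) := by
  unfold matrice_alt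
  apply map_range_congr
  intro i hi
  apply map_range_congr
  intro j hj
  rw [map_range_getD _ _ _ _ (by omega : i + Q.toList.length - 1 - j
        < P.toList.length + Q.toList.length - 1)]
  simp only []
  by_cases hij : j ≤ i
  · have hd : (0 : Int) ≤ (↑(i + Q.toList.length - 1 - j) : Int)
        - ((Q.toList.length : Int) - 1) := by omega
    rw [if_pos hd]
    have ht : ((↑(i + Q.toList.length - 1 - j) : Int)
        - ((Q.toList.length : Int) - 1)).toNat = i - j := by omega
    have hk : min i j = j := by omega
    rw [ht, hk]
    have h := diag_get P.toList Q.toList j (i - j) 0 0 (by simp) (by omega) (by omega)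
    rw [show i - j + j = i from by omega] at h
    simpa using h
  · have hd : ¬ ((0 : Int) ≤ (↑(i + Q.toList.length - 1 - j) : Int)
        - ((Q.toList.length : Int) - 1)) := by omega
    rw [if_neg hd]
    have ht : (-((↑(i + Q.toList.length - 1 - j) : Int)
        - ((Q.toList.length : Int) - 1))).toNat = j - i := by omega
    have hk : min i j = i := by omega
    rw [ht, hk]
    have h := diag_get P.toList Q.toList i 0 (j - i) 0 (by simp) (by omega) (by omega)
    rw [show j - i + i = j from by omega] at h
    simpa using h

-- ===== VERDICT (by name: the statement is the Claim_ definition above) =====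
theorem matrice_spec : Claim_equal_matrice := by
  intro P Q _
  unfold Spec_matrice matrice
  rw [outer_fold P.toList Q.toList P.toList.length le_rfl, alt_eq]
  apply map_range_congr
  intro i hi
  rw [if_pos hi]
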